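-- pv_equiv track=rewrite | github.com/Liren4396/Shell-and-Python-regular-expression- | lab 10/dna.py | mast_common_base
-- ===== SOURCE A (Python) =====
-- def mast_common_base(dna):
--     """
--     Given DNA in the aforementioned format,
--     return the most common first base:
--     eg. given:
--     A <-> T
--     G <-> C
--     G <-> C
--     C <-> G
--     G <-> C
--     T <-> A
--     The most common first base is 'G'.
--     Empty bases should be ignored.
--     """
--     count_g = 0
--     count_a = 0
--     count_c = 0
--     count_t = 0
--     count_u = 0
--     for i in dna:
--         if i[0] == 'G':
--             count_g += 1
--         if i[0] == 'A':
--             count_a += 1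
--         if i[0] == 'C':
--             count_c += 1
--         if i[0] == 'T':
--             count_t += 1
--         if i[0] == 'U':
--             count_u += 1
--     max = count_t
--     if max < count_a:
--         max = count_a
--     if max < count_c:
--         max = count_c
--     if max < count_g:
--         max = count_g
--     if max < count_u:
--         max = count_u
--     if max == count_g:
--         return "G"
--     if max == count_a:
--         return "A"
--     if max == count_c:
--         return "C"
--     if max == count_t:
--         return "T"
--     if max == count_u:
--         return "U"
-- ===== SOURCE B (Python) =====
-- def mast_common_base(dna):
--     """No counting pass with an accumulator: extract the first bases once,
--     then pick the winner as the first maximal element of "GACTU" under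
--     list.count (five independent scans; same G>A>C>T>U tie order as A)."""
--     firsts = [i[0] for i in dna]
--     return max("GACTU", key=firsts.count)
-- ===== Notes on version B (the rewrite author's own statement) =====
-- stated objective: simpler
-- what changed: B drops A's accumulator loop entirely: it materialises the list of first bases and picks the winner as the first maximal element of "GACTU" under list.count (five independent scans), instead of A's single tallying pass over five named counters followed by a running-max chain and a five-branch return chain.
import Mathlib
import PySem

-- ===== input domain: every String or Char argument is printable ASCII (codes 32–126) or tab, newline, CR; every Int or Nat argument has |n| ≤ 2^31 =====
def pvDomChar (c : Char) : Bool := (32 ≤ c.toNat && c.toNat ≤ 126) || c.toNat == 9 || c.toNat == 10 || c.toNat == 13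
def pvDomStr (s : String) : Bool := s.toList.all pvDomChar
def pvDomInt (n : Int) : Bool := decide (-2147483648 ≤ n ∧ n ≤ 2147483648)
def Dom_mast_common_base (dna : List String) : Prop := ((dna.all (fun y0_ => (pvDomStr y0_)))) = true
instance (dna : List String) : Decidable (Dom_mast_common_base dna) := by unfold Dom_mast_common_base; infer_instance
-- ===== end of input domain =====

-- B drops A's accumulator loop: it materialises the list of first bases and picks the
-- winner as the first maximal element of "GACTU" under list.count (objective: simpler).

-- ===== PORT A =====
def mast_common_base (dna : List String) : String :=
  let st := dna.foldl (fun (st : Int × Int × Int × Int × Int) i =>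
    let ch := (PySem.Str.pyGet? i 0).getD ' '  -- i[0]; none = IndexError, excluded by Pre_
    let g := if ch = 'G' then st.1 + 1 else st.1
    let a := if ch = 'A' then st.2.1 + 1 else st.2.1
    let c := if ch = 'C' then st.2.2.1 + 1 else st.2.2.1
    let t := if ch = 'T' then st.2.2.2.1 + 1 else st.2.2.2.1
    let u := if ch = 'U' then st.2.2.2.2 + 1 else st.2.2.2.2
    (g, a, c, t, u)) (0, 0, 0, 0, 0)
  let m := st.2.2.2.1
  let m := if m < st.2.1 then st.2.1 else m
  let m := if m < st.2.2.1 then st.2.2.1 else m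
  let m := if m < st.1 then st.1 else m
  let m := if m < st.2.2.2.2 then st.2.2.2.2 else m
  if m = st.1 then "G"
  else if m = st.2.1 then "A"
  else if m = st.2.2.1 then "C"
  else if m = st.2.2.2.1 then "T"
  else if m = st.2.2.2.2 then "U"
  else ""  -- Python falls off returning None here; unreachable (m always equals one of the five counts)

-- ===== PORT B =====
def mast_common_base_alt (dna : List String) : String :=
  let firsts := dna.map (fun i => (PySem.Str.pyGet? i 0).getD ' ')  -- [i[0] for i in dna]
  -- max("GACTU", key=firsts.count): first maximal base
  String.ofList [(PySem.List.max? ['G', 'A', 'C', 'T', 'U']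
    (fun b => (PySem.List.count firsts b : Int))).getD 'G']

-- ===== PRECONDITION & SPEC =====
-- Pre_ excludes exactly the inputs containing an empty string, where i[0] raises IndexError in both Pythons.
def Pre_mast_common_base (dna : List String) : Prop := ∀ s ∈ dna, s ≠ ""
instance (dna : List String) : Decidable (Pre_mast_common_base dna) := by unfold Pre_mast_common_base; infer_instance
def pvWitness_mast_common_base : List String := ["AT", "GC", "GC", "CG", "TA"]
def Spec_mast_common_base (dna : List String) (out : String) : Prop := out = mast_common_base_alt dna
instance (dna : List String) (out : String) : Decidable (Spec_mast_common_base dna out) := by unfold Spec_mast_common_base; infer_instance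

-- ===== CLAIM (what is proved, stated in full; the proofs are below) =====
def Claim_equal_mast_common_base : Prop := ∀ (dna : List String), Dom_mast_common_base dna → Pre_mast_common_base dna → Spec_mast_common_base dna (mast_common_base dna)

-- ===== LEMMAS AND PROOFS =====

-- A's five counters, started at (g,a,c,t,u), are those offsets plus the number of
-- occurrences of each base among the first characters
-- counting a cons, as Int
lemma pv_cnt_cons (x c : Char) (fs : List Char) :
    (PySem.List.count (x :: fs) c : Int) = (if x = c then 1 else 0) + (PySem.List.count fs c : Int) := by
  simp only [PySem.List.count_eq, List.count_cons, beq_iff_eq]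
  split_ifs <;> push_cast <;> ring

-- A's five counters, started at (g,a,c,t,u), are those offsets plus the number of
-- occurrences of each base among the first characters
lemma pv_loop_count (dna : List String) (g a c t u : Int) :
    dna.foldl (fun (st : Int × Int × Int × Int × Int) i =>
      let ch := (PySem.Str.pyGet? i 0).getD ' '
      let g := if ch = 'G' then st.1 + 1 else st.1
      let a := if ch = 'A' then st.2.1 + 1 else st.2.1
      let c := if ch = 'C' then st.2.2.1 + 1 else st.2.2.1
      let t := if ch = 'T' then st.2.2.2.1 + 1 else st.2.2.2.1
      let u := if ch = 'U' then st.2.2.2.2 + 1 else st.2.2.2.2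
      (g, a, c, t, u)) (g, a, c, t, u)
    = (let fs := dna.map (fun i => (PySem.Str.pyGet? i 0).getD ' ')
       (g + (PySem.List.count fs 'G' : Int), a + (PySem.List.count fs 'A' : Int),
        c + (PySem.List.count fs 'C' : Int), t + (PySem.List.count fs 'T' : Int),
        u + (PySem.List.count fs 'U' : Int))) := by
  induction dna generalizing g a c t u with
  | nil => simp [PySem.List.count]
  | cons s rest ih =>
    simp only [List.foldl_cons, List.map_cons]
    rw [ih]
    simp only [pv_cnt_cons, Prod.mk.injEq]
    refine ⟨?_, ?_, ?_, ?_, ?_⟩ <;> split_ifs <;> omega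

set_option maxHeartbeats 4000000 in
-- A's running-max + branch chain is the first maximal base of ['G','A','C','T','U']
lemma pv_sel_eq (f : Char → Int) :
    (let m := f 'T'
     let m := if m < f 'A' then f 'A' else m
     let m := if m < f 'C' then f 'C' else m
     let m := if m < f 'G' then f 'G' else m
     let m := if m < f 'U' then f 'U' else m
     if m = f 'G' then "G"
     else if m = f 'A' then "A"
     else if m = f 'C' then "C"
     else if m = f 'T' then "T"
     else if m = f 'U' then "U"
     else "")
    = String.ofList [(PySem.List.max? ['G', 'A', 'C', 'T', 'U'] f).getD 'G'] := by
  simp only [PySem.List.max?, List.foldl]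
  split_ifs <;> first
    | rfl
    | omega
    | (dsimp only; split_ifs <;> first
        | rfl
        | omega
        | (dsimp only; split_ifs <;> first
            | rfl
            | omega
            | (dsimp only; split_ifs <;> first | rfl | omega)))

-- ===== VERDICT (by name: the statement is the Claim_ definition above) =====
set_option maxHeartbeats 4000000 in
theorem mast_common_base_spec : Claim_equal_mast_common_base := by
  intro dna _ _
  unfold Spec_mast_common_base mast_common_base mast_common_base_alt
  rw [pv_loop_count dna 0 0 0 0 0]
  simp only [zero_add]
  exact pv_sel_eq (fun b =>
    (PySem.List.count (dna.map (fun i => (PySem.Str.pyGet? i 0).getD ' ')) b : Int))
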